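-- pv_equiv track=rewrite | github.com/MrBrantCode/unitest_baseline | mut_generate/mist_train_taco/taco_4179/solution.py | largest_sum_of_squares
-- ===== SOURCE A (Python) =====
-- def largest_sum_of_squares(n, arr):
--     if n == 1:
--         return arr[0] ** 2
--
--     max1 = max(arr)
--     a = len(bin(max1)) - 2
--     lis = [0] * a
--
--     for i in range(a):
--         for j in range(n):
--             if arr[j] >= 2 ** i:
--                 x = bin(arr[j])
--                 x = x[2:]
--                 if x[-i - 1] == '1':
--                     lis[i] += 1
--
--     num = []
--     b = max(lis)
--
--     for i in range(b):
--         s = 0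
--         for j in range(a):
--             if lis[j] > 0:
--                 s += 2 ** j
--                 lis[j] -= 1
--         num.append(s)
--
--     ans = 0
--     c = len(num)
--
--     for i in range(c):
--         ans += num[i] ** 2
--
--     return ans
-- ===== SOURCE B (Python) =====
-- def largest_sum_of_squares(n, arr):
--     if n == 1:
--         return arr[0] ** 2
--     a = max(arr).bit_length()
--     counts = [0] * a
--     for v in arr[:max(n, 0)]:
--         j = 0
--         while v > 0:
--             if v & 1:
--                 counts[j] += 1
--             v >>= 1
--             j += 1
--     levels = sorted(set(c for c in counts if c > 0))
--     val = sum(1 << j for j, c in enumerate(counts) if c > 0)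
--     ans = 0
--     prev = 0
--     for t in levels:
--         ans += val * val * (t - prev)
--         val -= sum(1 << j for j, c in enumerate(counts) if c == t)
--         prev = t
--     return ans
-- ===== Notes on version B (the rewrite author's own statement) =====
-- stated objective: faster
-- what changed: B counts bits element-major (one shift loop per element into a counts array, no bin() strings and no bit-major rescans), and replaces A's b rounds of greedy decrement that build the list of numbers by a sort of the distinct positive counts and a single walk over those threshold levels, adding value^2 times the run length of each constant block.
import Mathlib
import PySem

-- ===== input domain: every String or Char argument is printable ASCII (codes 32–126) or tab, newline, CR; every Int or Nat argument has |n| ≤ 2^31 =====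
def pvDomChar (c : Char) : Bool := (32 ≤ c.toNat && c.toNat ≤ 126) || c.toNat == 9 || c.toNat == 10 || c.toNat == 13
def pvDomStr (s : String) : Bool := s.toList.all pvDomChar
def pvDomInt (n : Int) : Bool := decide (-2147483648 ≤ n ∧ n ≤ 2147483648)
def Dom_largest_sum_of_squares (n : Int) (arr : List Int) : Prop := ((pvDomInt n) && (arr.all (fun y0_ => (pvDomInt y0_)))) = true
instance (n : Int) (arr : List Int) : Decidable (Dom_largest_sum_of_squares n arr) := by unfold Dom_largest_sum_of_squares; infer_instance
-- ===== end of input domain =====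

-- B counts bits element-major (one shift loop per element, no bin() strings) and replaces A's
-- max(lis)-many greedy decrement rounds by a sort of the distinct positive counts and a single
-- walk over those threshold levels, adding value*value times the length of each constant block.

-- ===== PORT A =====
-- Literal transliteration of A.  Notes on exactness: `2 ** i` with i from range(a) is 2 ^ i.toNat
-- (i ≥ 0 there); `lis[i] += 1` / `lis[j] -= 1` are List.set/getD at i.toNat — exact because the
-- indices come from range(a) and are in range; arr[j] is pyGet? with .getD 0, exact under Pre_
-- (j < n ≤ len arr); max(arr)/max(lis) are max? with .getD 0, exact since the lists are nonempty
-- under Pre_ (a ≥ 1 always).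
def largest_sum_of_squares (n : Int) (arr : List Int) : Int :=
  if n = 1 then ((PySem.List.pyGet? arr 0).getD 0) ^ 2
  else
    let max1 : Int := (PySem.List.max? arr (fun x => x)).getD 0
    let a : Int := PySem.Str.len (PySem.Int.pyBin max1) - 2
    let lis : List Int := List.replicate a.toNat 0
    let lis : List Int := (PySem.List.pyRange 0 a 1).foldl (fun lis i =>
      (PySem.List.pyRange 0 n 1).foldl (fun lis j =>
        if (PySem.List.pyGet? arr j).getD 0 ≥ 2 ^ i.toNat then
          let x := PySem.Int.pyBin ((PySem.List.pyGet? arr j).getD 0)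
          let x := PySem.Str.slice x (some 2) none
          if (PySem.Str.pyGet? x (-i - 1)).getD ' ' = '1' then
            lis.set i.toNat (lis.getD i.toNat 0 + 1)
          else lis
        else lis) lis) lis
    let b : Int := (PySem.List.max? lis (fun x => x)).getD 0
    let st : List Int × List Int := (PySem.List.pyRange 0 b 1).foldl (fun st _i =>
      let p : Int × List Int := (PySem.List.pyRange 0 a 1).foldl (fun p j =>
        if p.2.getD j.toNat 0 > 0 then
          (p.1 + 2 ^ j.toNat, p.2.set j.toNat (p.2.getD j.toNat 0 - 1))
        else p) (0, st.1)
      (p.2, st.2 ++ [p.1])) (lis, [])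
    let num : List Int := st.2
    (PySem.List.pyRange 0 (PySem.List.len num) 1).foldl
      (fun ans i => ans + ((PySem.List.pyGet? num i).getD 0) ^ 2) 0

-- ===== PORT B =====
-- Literal transliteration of Source B.  The inner `while v > 0` bit-extraction loop is the recursion
-- pvAddBits (terminating because v >>> (1:Nat) < v for v > 0); `v & 1` is PySem.Int.band, `v >>= 1` is
-- >>> 1, `counts[j] += 1` is List.set/getD (exact: j stays below len(counts) for v ≤ max(arr));
-- `sorted(set(...))` is PySem.List.sorted of PySem.Set.ofList of the filter; `enumerate` is
-- PySem.List.enumerate; `1 << j` is (1 : Int) <<< j; `max(arr).bit_length()` is bitLength of max?.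
def pvAddBits (v : Int) (j : Nat) (counts : List Int) : List Int :=
  if h : 0 < v then
    pvAddBits (v >>> (1:Nat)) (j + 1)
      (if PySem.Int.band v 1 = 1 then counts.set j (counts.getD j 0 + 1) else counts)
  else counts
termination_by v.toNat
decreasing_by
  have h1 : v >>> (1:Nat) = v / 2 := by
    simp [Int.shiftRight_eq_div_pow]
  omega

def largest_sum_of_squares_alt (n : Int) (arr : List Int) : Int :=
  if n = 1 then ((PySem.List.pyGet? arr 0).getD 0) ^ 2
  else
    let a : Int := (PySem.Int.bitLength ((PySem.List.max? arr (fun x => x)).getD 0) : Int)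
    let counts : List Int := (PySem.List.slice arr none (some (max n 0))).foldl
      (fun counts v => pvAddBits v 0 counts) (List.replicate a.toNat 0)
    let levels : List Int :=
      PySem.List.sorted (PySem.Set.ofList (counts.filter (fun c => decide (c > 0)))) (fun x => x) false
    let val : Int := (PySem.List.enumerate counts 0).foldl
      (fun s (p : Int × Int) => if p.2 > 0 then s + (1 : Int) <<< p.1.toNat else s) 0
    let st : Int × Int × Int := levels.foldl (fun st t =>
      (st.1 + st.2.1 * st.2.1 * (t - st.2.2),
       st.2.1 - (PySem.List.enumerate counts 0).foldl
         (fun s (p : Int × Int) => if p.2 = t then s + (1 : Int) <<< p.1.toNat else s) 0,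
       t)) (0, val, 0)
    st.1

-- ===== PRECONDITION & SPEC =====
-- Pre_ excludes exactly the inputs where A raises: empty arr (max()/arr[0] raise), and n > len(arr)
-- with n ≠ 1 (IndexError on arr[j]).  A returns on every input satisfying Pre_.
def Pre_largest_sum_of_squares (n : Int) (arr : List Int) : Prop :=
  arr ≠ [] ∧ n ≤ arr.length
instance (n : Int) (arr : List Int) : Decidable (Pre_largest_sum_of_squares n arr) := by
  unfold Pre_largest_sum_of_squares; infer_instance
def pvWitness_largest_sum_of_squares : Int × List Int := (3, [5, 2, 7])

def Spec_largest_sum_of_squares (n : Int) (arr : List Int) (out : Int) : Prop := out = largest_sum_of_squares_alt n arr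
instance (n : Int) (arr : List Int) (out : Int) : Decidable (Spec_largest_sum_of_squares n arr out) := by unfold Spec_largest_sum_of_squares; infer_instance

-- ===== CLAIM (what is proved, stated in full; the proofs are below) =====
def Claim_equal_largest_sum_of_squares : Prop := ∀ (n : Int) (arr : List Int), Dom_largest_sum_of_squares n arr → Pre_largest_sum_of_squares n arr → Spec_largest_sum_of_squares n arr (largest_sum_of_squares n arr)

-- ===== LEMMAS AND PROOFS =====

def pvDigits (M : Nat) : List Char :=
  if h : M < 2 then [Nat.digitChar (M % 2)]
  else pvDigits (M / 2) ++ [Nat.digitChar (M % 2)]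
decreasing_by exact Nat.div_lt_self (by omega) (by omega)

lemma pvDigits_toDigitsCore (f : Nat) : ∀ (M : Nat) (acc : List Char), M < f →
    Nat.toDigitsCore 2 f M acc = pvDigits M ++ acc := by
  induction f with
  | zero => intro M acc h; omega
  | succ f ih =>
    intro M acc h
    rw [Nat.toDigitsCore]
    by_cases h2 : M < 2
    · have : M / 2 = 0 := by omega
      simp only [this]
      rw [pvDigits, dif_pos h2]
      rfl
    · have hne : M / 2 ≠ 0 := by omega
      simp only [if_neg hne]
      rw [ih (M / 2) _ (by omega)]
      conv_rhs => rw [pvDigits]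
      rw [dif_neg h2]
      simp

lemma pvDigits_eq_toDigits (M : Nat) : Nat.toDigits 2 M = pvDigits M := by
  rw [Nat.toDigits, pvDigits_toDigitsCore (M + 1) M [] (by omega), List.append_nil]

lemma pvDigits_length_pos (M : Nat) : 1 ≤ (pvDigits M).length := by
  rw [pvDigits]
  split <;> simp

lemma pvDigits_bounds (M : Nat) (hM : 1 ≤ M) :
    2 ^ ((pvDigits M).length - 1) ≤ M ∧ M < 2 ^ (pvDigits M).length := by
  induction M using Nat.strong_induction_on with
  | _ M ih =>
    rw [pvDigits]
    by_cases h2 : M < 2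
    · rw [dif_pos h2]; simp; omega
    · rw [dif_neg h2]
      have h := ih (M / 2) (by omega) (by omega)
      rcases h with ⟨h1, hlt⟩
      have hp := pvDigits_length_pos (M / 2)
      constructor
      · simp only [List.length_append, List.length_singleton]
        calc 2 ^ ((pvDigits (M / 2)).length + 1 - 1) = 2 ^ ((pvDigits (M / 2)).length - 1) * 2 := by
              rw [← pow_succ]; congr 1; omega
          _ ≤ (M / 2) * 2 := by omega
          _ ≤ M := by omega
      · simp only [List.length_append, List.length_singleton]
        calc M < (M / 2) * 2 + 2 := by omega
          _ ≤ 2 ^ (pvDigits (M / 2)).length * 2 := by omega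
          _ = 2 ^ ((pvDigits (M / 2)).length + 1) := by rw [pow_succ]

lemma pvDigits_length_eq_bitLength (M : Nat) (hM : 1 ≤ M) :
    (pvDigits M).length = PySem.Int.bitLength (M : Int) := by
  induction M using Nat.strong_induction_on with
  | _ M ih =>
    rw [PySem.Int.bitLength_natCast (by omega), pvDigits]
    by_cases h2 : M < 2
    · rw [dif_pos h2]
      have : M = 1 := by omega
      subst this
      norm_num
    · rw [dif_neg h2]
      simp only [List.length_append, List.length_singleton]
      rw [ih (M / 2) (by omega) (by omega)]

lemma pvDigits_from_end (i : Nat) : ∀ (M : Nat), i < (pvDigits M).length →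
    (pvDigits M)[(pvDigits M).length - 1 - i]? = some (Nat.digitChar (M / 2 ^ i % 2)) := by
  induction i with
  | zero =>
    intro M hi
    rw [pvDigits]
    split
    · simp
    · rename_i h2
      simp only [List.length_append, List.length_singleton]
      rw [show (pvDigits (M / 2)).length + 1 - 1 - 0 = (pvDigits (M / 2)).length by omega]
      simp
  | succ i ih =>
    intro M hi
    conv_lhs => rw [pvDigits]
    conv at hi => rw [pvDigits]
    by_cases h2 : M < 2
    · rw [dif_pos h2] at hi ⊢
      simp at hi
    · rw [dif_neg h2] at hi ⊢
      simp only [List.length_append, List.length_singleton] at hi ⊢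
      have hp := pvDigits_length_pos (M / 2)
      have hidx : (pvDigits (M / 2)).length + 1 - 1 - (i + 1) = (pvDigits (M / 2)).length - 1 - i := by omega
      rw [hidx, List.getElem?_append_left (by omega)]
      rw [ih (M / 2) (by omega)]
      congr 2
      rw [Nat.div_div_eq_div_mul]
      ring_nf

def pvBitB (i : Nat) (v : Int) : Bool := decide (0 < v) && decide (v.toNat / 2 ^ i % 2 = 1)
def pvCnt (arr : List Int) (n' : Nat) (i : Nat) : Int := ((arr.take n').countP (pvBitB i) : Int)
def pvCounts (arr : List Int) (n' a' : Nat) : List Int :=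
  (List.range a').map (fun j => pvCnt arr n' j)
def pvLevel (counts : List Int) (t : Int) : Int :=
  ((List.range counts.length).map (fun j => if counts.getD j 0 > t then (2:Int) ^ j else 0)).sum
def pvEqW (counts : List Int) (t : Int) : Int :=
  ((List.range counts.length).map (fun j => if counts.getD j 0 = t then (2:Int) ^ j else 0)).sum

lemma pvStr_char (v : Int) (k : Nat) (hv : 0 < v) (hk : 2 ^ k ≤ v.toNat) :
    (PySem.Str.pyGet? (PySem.Str.slice (PySem.Int.pyBin v) (some 2) none) (-(k:Int) - 1)).getD ' '
      = Nat.digitChar (v.toNat / 2 ^ k % 2) := by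
  have hlt : k + 1 ≤ (pvDigits v.toNat).length := by
    have hb := (pvDigits_bounds v.toNat (by omega)).2
    have : 2 ^ k < 2 ^ (pvDigits v.toNat).length := by omega
    have := (Nat.pow_lt_pow_iff_right (by omega : 1 < 2)).mp this
    omega
  have hlist : (PySem.Str.slice (PySem.Int.pyBin v) (some 2) none).toList = pvDigits v.toNat := by
    rw [PySem.Str.slice, String.toList_ofList, PySem.Chars.slice_eq_listSlice,
      PySem.Int.toList_pyBin, PySem.Int.toBinChars0b, if_neg (by omega : ¬ v < 0),
      PySem.List.slice_from _ (by norm_num : (0:Int) ≤ 2)]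
    rw [show (Int.toNat 2) = 2 from rfl, pvDigits_eq_toDigits]
    rfl
  rw [PySem.Str.pyGet?, PySem.Chars.pyGet?_eq_listPyGet?, hlist]
  rw [show -(k:Int) - 1 = -((k+1 : Nat) : Int) by push_cast; ring]
  rw [PySem.List.pyGet?_neg_natCast _ (k+1) (by omega) hlt]
  rw [show (pvDigits v.toNat).length - (k+1) = (pvDigits v.toNat).length - 1 - k by omega]
  rw [pvDigits_from_end k v.toNat (by omega)]
  rfl

lemma pvTestA_iff (v : Int) (k : Nat) :
    ((2:Int) ^ k ≤ v ∧ (PySem.Str.pyGet? (PySem.Str.slice (PySem.Int.pyBin v) (some 2) none)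
        (-(k:Int) - 1)).getD ' ' = '1') ↔ pvBitB k v = true := by
  have hc : ((2:Int) ^ k) = ((2 ^ k : Nat) : Int) := by push_cast; ring
  have hpn : 0 < 2 ^ k := by positivity
  constructor
  · rintro ⟨hge, hstr⟩
    have hv : 0 < v := lt_of_lt_of_le (by positivity) hge
    have hvn : 2 ^ k ≤ v.toNat := by rw [hc] at hge; omega
    rw [pvStr_char v k hv hvn] at hstr
    have hmod : v.toNat / 2 ^ k % 2 < 2 := Nat.mod_lt _ (by omega)
    interval_cases h : v.toNat / 2 ^ k % 2
    · simp [Nat.digitChar] at hstr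
    · simp [pvBitB, hv, h]
  · intro hb
    simp only [pvBitB, Bool.and_eq_true, decide_eq_true_eq] at hb
    obtain ⟨hv, hbit⟩ := hb
    have hdiv : 1 ≤ v.toNat / 2 ^ k := by
      rcases Nat.eq_zero_or_pos (v.toNat / 2 ^ k) with h | h
      · rw [h] at hbit; simp at hbit
      · omega
    have hvn : 2 ^ k ≤ v.toNat := by
      have := (Nat.one_le_div_iff hpn).mp hdiv
      omega
    refine ⟨by rw [hc]; omega, ?_⟩
    rw [pvStr_char v k hv hvn, hbit]
    rfl

lemma pvCountP_range (arr : List Int) (p : Int → Bool) (k : Nat) (hk : k ≤ arr.length) :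
    (List.range k).countP (fun j => p (arr.getD j 0)) = (arr.take k).countP p := by
  induction k with
  | zero => simp
  | succ k ih =>
    rw [List.range_succ, List.countP_append, ih (by omega), List.take_add_one,
      List.countP_append]
    have : arr[k]? = some arr[k] := List.getElem?_eq_getElem (by omega)
    simp [this, List.getD_eq_getElem?_getD]

lemma pvSetD_self (lis : List Int) (i : Nat) (h : i < lis.length) (g : Int) :
    (lis.set i g).getD i 0 = g := by
  rw [List.getD_eq_getElem?_getD, List.getElem?_set_self (by simpa using h)]; rfl

lemma pvFoldl_set_count {α : Type} (L : List α) (p : α → Bool) (i : Nat) :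
    ∀ (lis : List Int),
    L.foldl (fun lis x => if p x then lis.set i (lis.getD i 0 + 1) else lis) lis
      = lis.set i (lis.getD i 0 + (L.countP p : Int)) := by
  induction L with
  | nil =>
    intro lis
    simp only [List.foldl_nil, List.countP_nil, Nat.cast_zero, add_zero]
    by_cases h : i < lis.length
    · rw [List.getD_eq_getElem?_getD, List.getElem?_eq_getElem h]; simp
    · rw [List.set_eq_of_length_le (by omega)]
  | cons x L ih =>
    intro lis
    simp only [List.foldl_cons]
    by_cases hx : p x
    · rw [if_pos hx, ih, List.countP_cons, if_pos hx]
      by_cases h : i < lis.length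
      · rw [List.set_set]
        congr 1
        rw [pvSetD_self lis i h]
        push_cast
        ring
      · have hle : lis.length ≤ i := by omega
        simp [List.set_eq_of_length_le hle]
    · rw [if_neg hx, ih, List.countP_cons, if_neg hx, add_zero]

lemma pvFoldl_override (c : Int → Int) (a' : Nat) :
    (PySem.List.pyRange 0 (a' : Int) 1).foldl
        (fun lis i => lis.set i.toNat (lis.getD i.toNat 0 + c i)) (List.replicate a' 0)
      = (List.range a').map (fun j => c ((j : Nat) : Int)) := by
  have key : ∀ k, k ≤ a' →
      (PySem.List.pyRange 0 (k : Int) 1).foldl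
          (fun lis i => lis.set i.toNat (lis.getD i.toNat 0 + c i)) (List.replicate a' 0)
        = (List.range k).map (fun j => c ((j : Nat) : Int)) ++ List.replicate (a' - k) 0 := by
    intro k hk
    induction k with
    | zero => simp [PySem.List.pyRange_one_eq_nil]
    | succ k ih =>
      rw [show ((k+1 : Nat) : Int) = (k : Int) + 1 by push_cast; ring,
        PySem.List.pyRange_one_succ_right (by positivity), List.foldl_append, ih (by omega)]
      simp only [List.foldl_cons, List.foldl_nil, Int.toNat_natCast]
      have hlm : ((List.range k).map (fun j => c ((j : Nat) : Int))).length = k := by simp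
      have hrep : List.replicate (a' - k) (0:Int) = 0 :: List.replicate (a' - k - 1) 0 := by
        rw [← List.replicate_succ]; congr 1; omega
      rw [List.getD_eq_getElem?_getD, List.getElem?_append_right (by omega),
        List.set_append, if_neg (by omega)]
      rw [hlm, Nat.sub_self, hrep]
      simp only [List.getElem?_cons_zero, Option.getD_some, List.set_cons_zero, zero_add]
      rw [List.range_succ, List.map_append]
      simp only [List.map_cons, List.map_nil, List.append_assoc, List.singleton_append]
      congr 2
  have := key a' (le_refl a')
  simpa using this

lemma pvFoldl_dec (a' : Nat) (s0 : Int) (lis : List Int) (hl : lis.length = a') :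
    (PySem.List.pyRange 0 (a' : Int) 1).foldl (fun (p : Int × List Int) j =>
        if p.2.getD j.toNat 0 > 0 then
          (p.1 + 2 ^ j.toNat, p.2.set j.toNat (p.2.getD j.toNat 0 - 1))
        else p) (s0, lis)
      = (s0 + pvLevel lis 0, lis.map (fun x => if x > 0 then x - 1 else x)) := by
  have key : ∀ k, k ≤ a' →
      (PySem.List.pyRange 0 (k : Int) 1).foldl (fun (p : Int × List Int) j =>
          if p.2.getD j.toNat 0 > 0 then
            (p.1 + 2 ^ j.toNat, p.2.set j.toNat (p.2.getD j.toNat 0 - 1))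
          else p) (s0, lis)
        = (s0 + ((List.range k).map (fun j => if lis.getD j 0 > 0 then (2:Int) ^ j else 0)).sum,
           (lis.take k).map (fun x => if x > 0 then x - 1 else x) ++ lis.drop k) := by
    intro k hk
    induction k with
    | zero => simp [PySem.List.pyRange_one_eq_nil]
    | succ k ih =>
      rw [show ((k+1 : Nat) : Int) = (k : Int) + 1 by push_cast; ring,
        PySem.List.pyRange_one_succ_right (by positivity), List.foldl_append, ih (by omega)]
      simp only [List.foldl_cons, List.foldl_nil, Int.toNat_natCast]
      have hkl : k < lis.length := by omega
      have hml : ((lis.take k).map (fun x => if x > 0 then x - 1 else x)).length = k := by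
        simp; omega
      have hgd : ((lis.take k).map (fun x => if x > 0 then x - 1 else x) ++ lis.drop k).getD k 0
          = lis[k] := by
        rw [List.getD_eq_getElem?_getD, List.getElem?_append_right (by omega), hml,
          Nat.sub_self, List.getElem?_drop, Nat.add_zero, List.getElem?_eq_getElem hkl]
        rfl
      have hdrop : lis.drop k = lis[k] :: lis.drop (k + 1) := List.drop_eq_getElem_cons hkl
      have hgdk : lis.getD k 0 = lis[k] := by
        rw [List.getD_eq_getElem?_getD, List.getElem?_eq_getElem hkl]; rfl
      rw [List.range_succ, List.map_append, List.sum_append]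
      simp only [List.map_cons, List.map_nil, List.sum_cons, List.sum_nil, add_zero]
      by_cases hpos : lis[k] > 0
      · rw [if_pos (by rw [hgd]; exact hpos)]
        simp only [hgd]
        rw [List.set_append, if_neg (by omega), hml, Nat.sub_self, hdrop,
          List.set_cons_zero]
        simp only [Prod.mk.injEq]
        refine ⟨?_, ?_⟩
        · rw [hgdk, if_pos hpos]; ring
        · have hm : (List.map (fun x : Int => if x > 0 then x - 1 else x) lis)[k]?
              = some (lis[k] - 1) := by
            rw [List.getElem?_map, List.getElem?_eq_getElem hkl]
            simp [hpos]
          rw [List.map_take, List.map_take, List.take_add_one, hm]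
          simp
      · rw [if_neg (by rw [hgd]; exact hpos)]
        simp only [Prod.mk.injEq]
        refine ⟨?_, ?_⟩
        · rw [hgdk, if_neg hpos]; ring
        · have hm : (List.map (fun x : Int => if x > 0 then x - 1 else x) lis)[k]?
              = some lis[k] := by
            rw [List.getElem?_map, List.getElem?_eq_getElem hkl]
            simp [hpos]
          rw [List.map_take, List.map_take, List.take_add_one, hm, hdrop]
          simp
  have h := key a' (le_refl a')
  rw [h, List.take_of_length_le (by omega), List.drop_eq_nil_of_le (by omega), List.append_nil,
    pvLevel, hl]

lemma pvFoldlMaxRep (k : Nat) : List.foldl max 0 (List.replicate k (0:Int)) = 0 := by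
  induction k with
  | zero => rfl
  | succ k ih => rw [List.replicate_succ, List.foldl_cons, max_self]; exact ih

lemma pvRepMax (k : Nat) (hk : 1 ≤ k) :
    (PySem.List.max? (List.replicate k (0:Int)) (fun x => x)).getD 0 = 0 := by
  obtain ⟨k', rfl⟩ : ∃ k', k = k' + 1 := ⟨k - 1, by omega⟩
  rw [List.replicate_succ, PySem.List.max?_id_cons, Option.getD_some, pvFoldlMaxRep]

lemma pvLevel_shift (C : List Int) (t : Nat) :
    pvLevel (C.map (fun x => max (x - (t:Int)) 0)) 0 = pvLevel C (t : Int) := by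
  unfold pvLevel
  rw [List.length_map]
  congr 1
  apply List.map_congr_left
  intro j hj
  have hjl : j < C.length := List.mem_range.mp hj
  have : (C.map (fun x => max (x - (t:Int)) 0)).getD j 0 = max (C[j] - (t:Int)) 0 := by
    rw [List.getD_eq_getElem?_getD, List.getElem?_map, List.getElem?_eq_getElem hjl]; rfl
  rw [this, List.getD_eq_getElem?_getD, List.getElem?_eq_getElem hjl]
  simp only [Option.getD_some]
  congr 1
  simp only [eq_iff_iff]
  omega

lemma pvDec_step (C : List Int) (hC : ∀ x ∈ C, 0 ≤ x) (t : Nat) :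
    (C.map (fun x => max (x - (t:Int)) 0)).map (fun x => if x > 0 then x - 1 else x)
      = C.map (fun x => max (x - ((t:Int)+1)) 0) := by
  rw [List.map_map]
  apply List.map_congr_left
  intro x hx
  have := hC x hx
  simp only [Function.comp_apply]
  split_ifs <;> omega

lemma pvDec_zero (C : List Int) (hC : ∀ x ∈ C, 0 ≤ x) :
    C.map (fun x => max (x - ((0:Nat):Int)) 0) = C := by
  conv_rhs => rw [← List.map_id C]
  apply List.map_congr_left
  intro x hx
  have := hC x hx
  simp
  omega

lemma pvPhase2 (a' : Nat) (C : List Int) (hlen : C.length = a') (hC : ∀ x ∈ C, 0 ≤ x) (t : Nat) :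
    (List.range t).foldl (fun (st : List Int × List Int) (_k : Nat) =>
        (((PySem.List.pyRange 0 (a' : Int) 1).foldl (fun (p : Int × List Int) j =>
            if p.2.getD j.toNat 0 > 0 then
              (p.1 + 2 ^ j.toNat, p.2.set j.toNat (p.2.getD j.toNat 0 - 1))
            else p) (0, st.1)).2,
         st.2 ++ [((PySem.List.pyRange 0 (a' : Int) 1).foldl (fun (p : Int × List Int) j =>
            if p.2.getD j.toNat 0 > 0 then
              (p.1 + 2 ^ j.toNat, p.2.set j.toNat (p.2.getD j.toNat 0 - 1))
            else p) (0, st.1)).1])) (C, [])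
      = (C.map (fun x => max (x - (t:Int)) 0), (List.range t).map (fun (i : Nat) => pvLevel C (i : Int))) := by
  induction t with
  | zero =>
    have h0 := pvDec_zero C hC
    simp only [Nat.cast_zero, sub_zero] at h0
    simp [h0]
  | succ t ih =>
    rw [List.range_succ, List.foldl_append, ih, List.foldl_cons, List.foldl_nil]
    have hl2 : (C.map (fun x => max (x - (t:Int)) 0)).length = a' := by simp [hlen]
    rw [pvFoldl_dec a' 0 _ hl2]
    simp only [Prod.mk.injEq]
    refine ⟨?_, ?_⟩
    · rw [pvDec_step C hC t]
      push_cast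
      rfl
    · rw [zero_add, pvLevel_shift C t]
      simp

lemma pvListFinset (f : Nat → Int) (t : Nat) :
    ((List.range t).map f).sum = ∑ i ∈ Finset.range t, f i := by
  induction t with
  | zero => simp
  | succ t ih => rw [List.range_succ, List.map_append, List.sum_append, Finset.sum_range_succ, ih]; simp

-- A reduced to the canonical sum of squared levels over Finset.range.
lemma pvA_canon (n : Int) (arr : List Int) (hlen : (n:Int) ≤ arr.length) (hn : n ≠ 1)
    (m : Int) (hmax : PySem.List.max? arr (fun x => x) = some m) (hm : 0 < m) :
    largest_sum_of_squares n arr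
      = ∑ i ∈ Finset.range ((PySem.List.maxD (pvCounts arr n.toNat (pvDigits m.toNat).length)
            (fun x => x) 0).toNat),
          pvLevel (pvCounts arr n.toNat (pvDigits m.toNat).length) (i : Int) ^ 2 := by
  simp only [largest_sum_of_squares, if_neg hn, hmax, Option.getD_some]
  set a' : Nat := (pvDigits m.toNat).length with ha'
  set n' : Nat := n.toNat with hn'
  have hn'len : n' ≤ arr.length := by omega
  have hA_a : PySem.Str.len (PySem.Int.pyBin m) - 2 = (a' : Int) := by
    rw [PySem.Str.len, PySem.Int.toList_pyBin, PySem.Int.toBinChars0b, if_neg (by omega : ¬ m < 0),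
      pvDigits_eq_toDigits]
    simp only [List.length_cons, ha']
    push_cast
    ring_nf
  rw [hA_a]
  have hbody : ∀ (lis : List Int), ∀ i ∈ PySem.List.pyRange 0 (a' : Int) 1,
      List.foldl (fun lis j =>
        if (PySem.List.pyGet? arr j).getD 0 ≥ 2 ^ i.toNat then
          if (PySem.Str.pyGet? (PySem.Str.slice (PySem.Int.pyBin ((PySem.List.pyGet? arr j).getD 0))
              (some 2) none) (-i - 1)).getD ' ' = '1' then
            lis.set i.toNat (lis.getD i.toNat 0 + 1)
          else lis
        else lis) lis (PySem.List.pyRange 0 n 1)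
      = lis.set i.toNat (lis.getD i.toNat 0 + pvCnt arr n' i.toNat) := by
    intro lis i hi
    have h0 : 0 ≤ i := (PySem.List.mem_pyRange_one.mp hi).1
    have hik : i = (i.toNat : Int) := by omega
    rw [hik, Int.toNat_natCast]
    set k := i.toNat with hk
    rw [PySem.List.pyRange_one 0 n, List.foldl_map]
    simp only [zero_add, sub_zero, hn']
    rw [PySem.List.foldl_congr_mem _ _
      (fun lis (jn : Nat) => if pvBitB k (arr.getD jn 0) then lis.set k (lis.getD k 0 + 1) else lis) _
      ?_]
    · rw [pvFoldl_set_count (List.range n') (fun jn => pvBitB k (arr.getD jn 0)) k lis,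
        pvCountP_range arr (pvBitB k) n' hn'len, pvCnt]
    · intro acc jn _
      have hv : (PySem.List.pyGet? arr (jn : Int)).getD 0 = arr.getD jn 0 := by
        rw [PySem.List.pyGet?_natCast, List.getD_eq_getElem?_getD]
      simp only [hv]
      by_cases hb : pvBitB k (arr.getD jn 0) = true
      · have hab := (pvTestA_iff (arr.getD jn 0) k).mpr hb
        rw [if_pos hab.1, if_pos hab.2, if_pos hb]
      · rw [if_neg hb]
        by_cases h1 : arr.getD jn 0 ≥ 2 ^ k
        · rw [if_pos h1]
          by_cases h2 : (PySem.Str.pyGet? (PySem.Str.slice (PySem.Int.pyBin (arr.getD jn 0))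
              (some 2) none) (-(k : Int) - 1)).getD ' ' = '1'
          · exact absurd ((pvTestA_iff (arr.getD jn 0) k).mp ⟨h1, h2⟩) hb
          · rw [if_neg h2]
        · rw [if_neg h1]
  have hcount : List.foldl (fun lis i =>
      List.foldl (fun lis j =>
        if (PySem.List.pyGet? arr j).getD 0 ≥ 2 ^ i.toNat then
          if (PySem.Str.pyGet? (PySem.Str.slice (PySem.Int.pyBin ((PySem.List.pyGet? arr j).getD 0))
              (some 2) none) (-i - 1)).getD ' ' = '1' then
            lis.set i.toNat (lis.getD i.toNat 0 + 1)
          else lis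
        else lis) lis (PySem.List.pyRange 0 n 1))
      (List.replicate ((a' : Int)).toNat 0) (PySem.List.pyRange 0 (a' : Int) 1)
      = pvCounts arr n' a' := by
    rw [Int.toNat_natCast, PySem.List.foldl_congr_mem _ _
      (fun lis i => lis.set i.toNat (lis.getD i.toNat 0 + pvCnt arr n' i.toNat)) _ hbody,
      pvFoldl_override (fun i => pvCnt arr n' i.toNat) a', pvCounts]
    simp only [Int.toNat_natCast]
  rw [hcount]
  set C : List Int := pvCounts arr n' a' with hCdef
  have hClen : C.length = a' := by rw [hCdef]; simp [pvCounts]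
  have hC : ∀ x ∈ C, 0 ≤ x := by
    rw [hCdef]
    intro x hx
    rw [pvCounts] at hx
    obtain ⟨j, -, rfl⟩ := List.mem_map.mp hx
    rw [pvCnt]
    positivity
  have hmaxD : (PySem.List.maxD C (fun x => x) 0 : Int) = (PySem.List.max? C (fun x => x)).getD 0 := rfl
  rw [← hmaxD] at *
  rw [PySem.List.pyRange_one 0 (PySem.List.maxD C (fun x => x) 0)]
  simp only [zero_add, sub_zero]
  set t : Nat := (PySem.List.maxD C (fun x => x) 0).toNat with htdef
  simp only [List.foldl_map]
  rw [pvPhase2 a' C hClen hC t]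
  dsimp only
  rw [PySem.List.len_eq]
  simp only [List.length_map, List.length_range]
  rw [PySem.List.pyRange_zero_nat t]
  simp only [List.foldl_map]
  have hA : ∀ (acc : Int), ∀ k ∈ List.range t,
      acc + (PySem.List.pyGet? (List.map (fun (i : Nat) => pvLevel C (i : Int)) (List.range t))
        (k : Int)).getD 0 ^ 2 = acc + pvLevel C (k : Int) ^ 2 := by
    intro acc k hk
    have hkt : k < t := List.mem_range.mp hk
    rw [PySem.List.pyGet?_natCast, List.getElem?_map, List.getElem?_range hkt]
    rfl
  rw [PySem.List.foldl_congr_mem _ _ (fun acc (k : Nat) => acc + pvLevel C (k : Int) ^ 2) _ hA,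
    PySem.List.foldl_add (g := fun (k : Nat) => pvLevel C (k : Int) ^ 2), zero_add,
    pvListFinset]

-- ===== B-side lemmas =====

lemma pvShiftHalfNat (v : Int) (hv : 0 < v) : (v >>> (1:Nat)) = ((v.toNat / 2 : Nat) : Int) := by
  have h1 : v >>> (1:Nat) = v / 2 := by
    simp [Int.shiftRight_eq_div_pow]
  omega

lemma pvAddBits_length : ∀ (N : Nat) (v : Int) (j : Nat) (counts : List Int), v.toNat ≤ N →
    (pvAddBits v j counts).length = counts.length := by
  intro N
  induction N with
  | zero =>
    intro v j counts hN
    rw [pvAddBits, dif_neg (by omega)]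
  | succ N ih =>
    intro v j counts hN
    rw [pvAddBits]
    by_cases h : 0 < v
    · rw [dif_pos h]
      rw [ih _ _ _ (by rw [pvShiftHalfNat v h]; omega)]
      split_ifs <;> simp
    · rw [dif_neg h]

lemma pvAddBits_getD : ∀ (N : Nat) (v : Int) (j : Nat) (counts : List Int), v.toNat ≤ N →
    (0 < v → j + PySem.Int.bitLength v ≤ counts.length) → ∀ (k : Nat),
    (pvAddBits v j counts).getD k 0
      = counts.getD k 0 + (if j ≤ k ∧ pvBitB (k - j) v = true then (1:Int) else 0) := by
  intro N
  induction N with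
  | zero =>
    intro v j counts hN hlen k
    rw [pvAddBits, dif_neg (by omega)]
    have : pvBitB (k - j) v = false := by
      simp [pvBitB, show ¬ 0 < v by omega]
    simp [this]
  | succ N ih =>
    intro v j counts hN hlen k
    rw [pvAddBits]
    by_cases h : 0 < v
    · rw [dif_pos h]
      have hhalf := pvShiftHalfNat v h
      have hq : PySem.Int.floordiv v 2 = ((v.toNat / 2 : Nat) : Int) := by
        rw [show v = ((v.toNat : Nat) : Int) by omega]
        exact_mod_cast PySem.Int.floordiv_natCast v.toNat 2
      have hbl : PySem.Int.bitLength v = PySem.Int.bitLength (v >>> (1:Nat)) + 1 := by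
        rw [PySem.Int.bitLength_of_pos h, hq, hhalf]
      have hjlt : j < counts.length := by
        have := hlen h
        omega
      set counts' := (if PySem.Int.band v 1 = 1 then counts.set j (counts.getD j 0 + 1) else counts)
        with hc'
      have hlen' : counts'.length = counts.length := by
        rw [hc']; split_ifs <;> simp
      have hstep : counts'.getD k 0
          = counts.getD k 0 + (if k = j ∧ PySem.Int.band v 1 = 1 then (1:Int) else 0) := by
        rw [hc']
        by_cases hb : PySem.Int.band v 1 = 1
        · rw [if_pos hb]
          by_cases hkj : k = j
          · subst hkj
            rw [pvSetD_self counts k hjlt, if_pos ⟨rfl, hb⟩]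
          · rw [List.getD_eq_getElem?_getD, List.getElem?_set_ne (by omega),
              ← List.getD_eq_getElem?_getD, if_neg (by tauto)]
            ring
        · rw [if_neg hb, if_neg (by tauto), add_zero]
      have hlenv : j + PySem.Int.bitLength v ≤ counts.length := hlen h
      rw [ih (v >>> (1:Nat)) (j + 1) counts' (by rw [hhalf]; omega)
          (fun h' => by rw [hlen']; omega) k, hstep]
      -- combine the two indicator terms
      have hmod : PySem.Int.band v 1 = 1 ↔ v.toNat % 2 = 1 := by
        rw [PySem.Int.band_one, PySem.Int.mod_eq_emod_of_pos (by norm_num)]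
        omega
      have hbit0 : pvBitB 0 v = true ↔ v.toNat % 2 = 1 := by
        simp [pvBitB, h]
      have hbitS : ∀ (i : Nat), pvBitB (i + 1) v = pvBitB i (v >>> (1:Nat)) := by
        intro i
        have h2 : (v >>> (1:Nat)).toNat = v.toNat / 2 := by rw [hhalf]; omega
        have h3 : v.toNat / 2 / 2 ^ i = v.toNat / 2 ^ (i + 1) := by
          rw [Nat.div_div_eq_div_mul, pow_succ']
        by_cases hz : (0:Int) < v >>> (1:Nat)
        · simp only [pvBitB, h, hz, decide_true, Bool.true_and, h2, h3]
        · have hv1 : v.toNat / 2 = 0 := by rw [← h2]; omega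
          have h4 : v.toNat / 2 ^ (i + 1) = 0 := by rw [← h3, hv1, Nat.zero_div]
          simp [pvBitB, h, hz, h4]
      by_cases hkj : k = j
      · subst hkj
        simp only [Nat.sub_self]
        have hB : (if k + 1 ≤ k ∧ pvBitB (k - (k + 1)) (v >>> (1:Nat)) = true then (1:Int) else 0)
            = 0 := if_neg (by omega)
        by_cases hb : v.toNat % 2 = 1
        · rw [hB, if_pos ⟨by simp, hmod.mpr hb⟩, if_pos ⟨by simp, hbit0.mpr hb⟩]
          ring
        · rw [hB, if_neg (fun hh => hb (hmod.mp hh.2)), if_neg (fun hh => hb (hbit0.mp hh.2))]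
          ring
      · by_cases hjk : j + 1 ≤ k
        · rw [if_neg (by tauto), add_zero]
          have hke : k - j = (k - (j + 1)) + 1 := by omega
          rw [hke, hbitS (k - (j+1))]
          by_cases hbb : pvBitB (k - (j+1)) (v >>> (1:Nat)) = true
          · rw [if_pos ⟨hjk, hbb⟩, if_pos ⟨by omega, hbb⟩]
          · rw [if_neg (fun hh => hbb hh.2), if_neg (fun hh => hbb hh.2)]
        · rw [if_neg (by tauto), if_neg (by omega), if_neg (by omega)]
          ring
    · rw [dif_neg h]
      have : pvBitB (k - j) v = false := by simp [pvBitB, h]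
      simp [this]

lemma pvFoldCounts (xs : List Int) : ∀ (counts : List Int),
    (∀ v ∈ xs, 0 < v → PySem.Int.bitLength v ≤ counts.length) →
    (xs.foldl (fun c v => pvAddBits v 0 c) counts).length = counts.length ∧
    ∀ k, (xs.foldl (fun c v => pvAddBits v 0 c) counts).getD k 0
        = counts.getD k 0 + (xs.countP (pvBitB k) : Int) := by
  induction xs with
  | nil => intro counts _; simp
  | cons v xs ih =>
    intro counts hb
    simp only [List.foldl_cons]
    have hlen1 : (pvAddBits v 0 counts).length = counts.length :=
      pvAddBits_length v.toNat v 0 counts (le_refl _)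
    have hstep : ∀ k, (pvAddBits v 0 counts).getD k 0
        = counts.getD k 0 + (if pvBitB k v = true then (1:Int) else 0) := by
      intro k
      rw [pvAddBits_getD v.toNat v 0 counts (le_refl _)
        (fun h => by simpa using hb v (by simp) h) k]
      congr 1
      simp
    obtain ⟨ihl, ihg⟩ := ih (pvAddBits v 0 counts)
      (fun w hw hw' => by rw [hlen1]; exact hb w (by simp [hw]) hw')
    refine ⟨by rw [ihl, hlen1], ?_⟩
    intro k
    rw [ihg k, hstep k, List.countP_cons]
    push_cast
    by_cases hbv : pvBitB k v = true <;> simp [hbv] <;> ring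

lemma pvEnumFold (C : List Int) (p : Int → Prop) [DecidablePred p] :
    (PySem.List.enumerate C 0).foldl
        (fun s (q : Int × Int) => if p q.2 then s + (1:Int) <<< q.1.toNat else s) 0
      = ((List.range C.length).map (fun j => if p (C.getD j 0) then (2:Int) ^ j else 0)).sum := by
  rw [PySem.List.enumerate_eq_map_pyRange C 0, List.foldl_map, PySem.List.len_eq,
    PySem.List.pyRange_zero_nat, List.foldl_map]
  rw [PySem.List.foldl_congr_mem _ _
    (fun s (j : Nat) => s + (if p (C.getD j 0) then (2:Int) ^ j else 0)) _ ?_]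
  · rw [PySem.List.foldl_add (g := fun (j : Nat) => if p (C.getD j 0) then (2:Int) ^ j else 0),
      zero_add]
  · intro acc j _
    rw [PySem.List.pyGetD_natCast, Int.toNat_natCast, Int.shiftLeft_eq, one_mul]
    dsimp only
    split_ifs <;> ring

lemma pvLevel_split (C : List Int) (prev t : Int) (hpt : prev < t)
    (h : ∀ c ∈ C, c > prev → c = t ∨ c > t) :
    pvLevel C prev = pvLevel C t + pvEqW C t := by
  unfold pvLevel pvEqW
  rw [← PySem.List.sum_map_add_int]
  apply congrArg
  apply List.map_congr_left
  intro j hj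
  have hjl : j < C.length := List.mem_range.mp hj
  have hmem : C.getD j 0 ∈ C := by
    rw [List.getD_eq_getElem?_getD, List.getElem?_eq_getElem hjl]
    exact List.getElem_mem hjl
  set c := C.getD j 0
  by_cases h1 : c > prev
  · rcases h c hmem h1 with h2 | h2
    · rw [if_pos h1, if_neg (by omega), if_pos h2]; ring
    · rw [if_pos h1, if_pos h2, if_neg (by omega)]; ring
  · rw [if_neg h1, if_neg (by omega), if_neg (by omega)]; ring

lemma pvLevel_const (C : List Int) (prev i : Int) (hpi : prev ≤ i)
    (h : ∀ c ∈ C, c > prev → i < c) :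
    pvLevel C i = pvLevel C prev := by
  unfold pvLevel
  apply congrArg
  apply List.map_congr_left
  intro j hj
  have hjl : j < C.length := List.mem_range.mp hj
  have hmem : C.getD j 0 ∈ C := by
    rw [List.getD_eq_getElem?_getD, List.getElem?_eq_getElem hjl]
    exact List.getElem_mem hjl
  set c := C.getD j 0
  by_cases h1 : c > prev
  · rw [if_pos h1, if_pos (h c hmem h1)]
  · rw [if_neg h1, if_neg (by omega)]

def pvLastN (L : List Int) (prev : Nat) : Nat := ((L.getLast?).getD (prev : Int)).toNat

lemma pvLastN_ge (L : List Int) (prev : Nat) (h : ∀ x ∈ L, (prev:Int) < x) :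
    prev ≤ pvLastN L prev := by
  cases hL : L.getLast? with
  | none => simp [pvLastN, hL]
  | some x =>
    have hx := h x (List.mem_of_getLast? hL)
    simp only [pvLastN, hL, Option.getD_some]
    omega

lemma pvLast_isMax : ∀ (L : List Int), L.Pairwise (· < ·) → ∀ x ∈ L, ∀ (d : Int),
    x ≤ (L.getLast?).getD d := by
  intro L
  induction L with
  | nil => intro _ x hx; simp at hx
  | cons a L ih =>
    intro hPW x hx d
    rw [List.pairwise_cons] at hPW
    cases hL : L with
    | nil =>
      subst hL
      simp at hx
      simp [hx]
    | cons b L' =>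
      subst hL
      rw [List.getLast?_cons_cons]
      rcases List.mem_cons.mp hx with rfl | hx'
      · have hb : x < b := hPW.1 b (by simp)
        have := ih hPW.2 b (by simp) d
        omega
      · exact ih hPW.2 x hx' d

lemma pvBlocks (C : List Int) :
    ∀ (L : List Int) (prev : Nat) (ans : Int),
    L.Pairwise (· < ·) → (∀ x ∈ L, (prev:Int) < x) → (∀ c ∈ C, c ≤ (prev:Int) ∨ c ∈ L) →
    L.foldl (fun st t => (st.1 + st.2.1 * st.2.1 * (t - st.2.2), st.2.1 - pvEqW C t, t))
        (ans, pvLevel C (prev:Int), (prev:Int))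
      = (ans + ∑ i ∈ Finset.Ico prev (pvLastN L prev), pvLevel C (i:Int) ^ 2,
         pvLevel C ((pvLastN L prev : Nat) : Int), ((pvLastN L prev : Nat) : Int)) := by
  intro L
  induction L with
  | nil =>
    intro prev ans _ _ _
    simp [pvLastN]
  | cons t L ih =>
    intro prev ans hPW hmem hcov
    have hpt : (prev:Int) < t := hmem t (by simp)
    rw [List.pairwise_cons] at hPW
    have htc : ((t.toNat : Nat) : Int) = t := by omega
    have hsplit : pvLevel C (prev:Int) = pvLevel C t + pvEqW C t := by
      apply pvLevel_split C (prev:Int) t hpt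
      intro c hc hcp
      rcases hcov c hc with h | h
      · omega
      · rcases List.mem_cons.mp h with rfl | h'
        · left; rfl
        · right; exact hPW.1 c h'
    simp only [List.foldl_cons]
    have hst : (ans + pvLevel C (prev:Int) * pvLevel C (prev:Int) * (t - (prev:Int)),
        pvLevel C (prev:Int) - pvEqW C t, t)
        = (ans + pvLevel C (prev:Int) * pvLevel C (prev:Int) * (t - (prev:Int)),
           pvLevel C ((t.toNat : Nat) : Int), ((t.toNat : Nat) : Int)) := by
      rw [htc]
      have h2 : pvLevel C t + pvEqW C t - pvEqW C t = pvLevel C t := by omega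
      rw [hsplit, h2]
    rw [hst, ih t.toNat _ hPW.2
      (fun x hx => by rw [htc]; exact hPW.1 x hx)
      (fun c hc => by
        rcases hcov c hc with h | h
        · left; rw [htc]; omega
        · rcases List.mem_cons.mp h with rfl | h'
          · left; rw [htc]
          · right; exact h')]
    have hlast : pvLastN (t :: L) prev = pvLastN L t.toNat := by
      cases L with
      | nil => simp [pvLastN]; omega
      | cons b L' =>
        obtain ⟨l, hl⟩ : ∃ l, (b :: L').getLast? = some l :=
          ⟨(b :: L').getLast (by simp), List.getLast?_eq_some_getLast (by simp)⟩
        simp [pvLastN, List.getLast?_cons_cons, hl]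
    rw [hlast]
    have hge : t.toNat ≤ pvLastN L t.toNat :=
      pvLastN_ge L t.toNat (fun x hx => by rw [htc]; exact hPW.1 x hx)
    have hblock : ∑ i ∈ Finset.Ico prev t.toNat, pvLevel C (i:Int) ^ 2
        = pvLevel C (prev:Int) ^ 2 * ((t.toNat - prev : Nat) : Int) := by
      calc ∑ i ∈ Finset.Ico prev t.toNat, pvLevel C (i:Int) ^ 2
          = ∑ _i ∈ Finset.Ico prev t.toNat, pvLevel C (prev:Int) ^ 2 := by
            refine Finset.sum_congr rfl (fun i hi => ?_)
            rw [Finset.mem_Ico] at hi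
            rw [pvLevel_const C (prev:Int) (i:Int) (by omega) (fun c hc hcp => by
              rcases hcov c hc with h | h
              · omega
              · rcases List.mem_cons.mp h with rfl | h'
                · omega
                · have := hPW.1 c h'; omega)]
        _ = pvLevel C (prev:Int) ^ 2 * ((t.toNat - prev : Nat) : Int) := by
            rw [Finset.sum_const, Nat.card_Ico, nsmul_eq_mul]
            ring
    rw [← Finset.sum_Ico_consecutive _ (by omega : prev ≤ t.toNat) hge, hblock]
    rw [Prod.ext_iff]
    refine ⟨?_, rfl⟩
    dsimp only
    have hcast : (t:Int) - (prev:Int) = ((t.toNat - prev : Nat) : Int) := by omega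
    rw [hcast]
    ring

-- B reduced to the canonical sum of squared levels over Finset.range.
lemma pvB_canon (n : Int) (arr : List Int) (hlen : (n:Int) ≤ arr.length)
    (hn : n ≠ 1)
    (m : Int) (hmax : PySem.List.max? arr (fun x => x) = some m) (hm : 0 < m) :
    largest_sum_of_squares_alt n arr
      = ∑ i ∈ Finset.range ((PySem.List.maxD (pvCounts arr n.toNat (pvDigits m.toNat).length)
            (fun x => x) 0).toNat),
          pvLevel (pvCounts arr n.toNat (pvDigits m.toNat).length) (i : Int) ^ 2 := by
  simp only [largest_sum_of_squares_alt, if_neg hn, hmax, Option.getD_some]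
  set a' : Nat := (pvDigits m.toNat).length with ha'
  set n' : Nat := n.toNat with hn'
  have hn'len : n' ≤ arr.length := by omega
  have hB_a : ((PySem.Int.bitLength m : Nat) : Int).toNat = a' := by
    have h := pvDigits_length_eq_bitLength m.toNat (by omega)
    rw [show ((m.toNat : Nat) : Int) = m by omega] at h
    omega
  rw [hB_a]
  have hslice : PySem.List.slice arr none (some (max n 0)) = arr.take n' := by
    rw [PySem.List.slice_to arr (le_max_right n 0)]
    congr 1
    omega
  rw [hslice]
  -- the element-major counting loop produces pvCounts
  have hbits : ∀ v ∈ arr.take n', 0 < v → PySem.Int.bitLength v ≤ (List.replicate a' (0:Int)).length := by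
    intro v hv hv0
    rw [List.length_replicate]
    have hvm : v ≤ m := PySem.List.max?_isMax hmax v (List.mem_of_mem_take hv)
    have hbv : PySem.Int.bitLength v = (pvDigits v.toNat).length := by
      have h := pvDigits_length_eq_bitLength v.toNat (by omega)
      rw [show ((v.toNat : Nat) : Int) = v by omega] at h
      exact h.symm
    rw [hbv]
    by_contra hcon
    have h1 := (pvDigits_bounds v.toNat (by omega)).1
    have h2 := (pvDigits_bounds m.toNat (by omega)).2
    rw [← ha'] at h2
    have h3 : 2 ^ a' ≤ 2 ^ ((pvDigits v.toNat).length - 1) :=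
      Nat.pow_le_pow_right (by omega) (by omega)
    have : v.toNat ≤ m.toNat := by omega
    omega
  obtain ⟨hCl, hCg⟩ := pvFoldCounts (arr.take n') (List.replicate a' 0) hbits
  have hCeq : (arr.take n').foldl (fun c v => pvAddBits v 0 c) (List.replicate a' 0)
      = pvCounts arr n' a' := by
    apply List.ext_getElem
    · rw [hCl, List.length_replicate, pvCounts, List.length_map, List.length_range]
    · intro k h1 h2
      have hk : k < a' := by
        rw [hCl, List.length_replicate] at h1; exact h1
      have hL : ((arr.take n').foldl (fun c v => pvAddBits v 0 c) (List.replicate a' 0))[k]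
          = ((arr.take n').foldl (fun c v => pvAddBits v 0 c) (List.replicate a' 0)).getD k 0 := by
        rw [List.getD_eq_getElem?_getD, List.getElem?_eq_getElem h1]; rfl
      rw [hL, hCg k, List.getD_replicate, zero_add]
      have hRk : (pvCounts arr n' a')[k] = pvCnt arr n' k := by
        simp [pvCounts]
      rw [hRk]
      rfl
      exact hk
  rw [hCeq]
  set C : List Int := pvCounts arr n' a' with hCdef
  have hClen : C.length = a' := by rw [hCdef]; simp [pvCounts]
  have hC0 : ∀ x ∈ C, 0 ≤ x := by
    rw [hCdef]
    intro x hx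
    rw [pvCounts] at hx
    obtain ⟨j, -, rfl⟩ := List.mem_map.mp hx
    rw [pvCnt]
    positivity
  -- the initial value is pvLevel C 0
  have hval : (PySem.List.enumerate C 0).foldl
      (fun s (p : Int × Int) => if p.2 > 0 then s + (1 : Int) <<< p.1.toNat else s) 0 = pvLevel C 0 := by
    rw [pvEnumFold C (fun c => c > 0), pvLevel]
  rw [hval]
  -- the inner eq-sum folds are pvEqW
  set levels : List Int :=
    PySem.List.sorted (PySem.Set.ofList (C.filter (fun c => decide (c > 0)))) (fun x => x) false
    with hlev
  have hbody : ∀ (st : Int × Int × Int), ∀ t ∈ levels,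
      (st.1 + st.2.1 * st.2.1 * (t - st.2.2),
       st.2.1 - (PySem.List.enumerate C 0).foldl
         (fun s (p : Int × Int) => if p.2 = t then s + (1 : Int) <<< p.1.toNat else s) 0,
       t)
      = (st.1 + st.2.1 * st.2.1 * (t - st.2.2), st.2.1 - pvEqW C t, t) := by
    intro st t _
    rw [pvEnumFold C (fun c => c = t), pvEqW]
  rw [PySem.List.foldl_congr_mem _ _
    (fun st t => (st.1 + st.2.1 * st.2.1 * (t - st.2.2), st.2.1 - pvEqW C t, t)) _ hbody]
  -- facts about levels
  have hmemlev : ∀ x, x ∈ levels ↔ (0 < x ∧ x ∈ C) := by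
    intro x
    rw [hlev, PySem.List.mem_sorted, PySem.Set.mem_ofList, List.mem_filter]
    constructor
    · rintro ⟨h1, h2⟩
      exact ⟨by simpa using h2, h1⟩
    · rintro ⟨h1, h2⟩
      exact ⟨h2, by simpa using h1⟩
  have hPW : levels.Pairwise (· < ·) := by
    rw [hlev]
    exact PySem.List.sorted_ofList_pairwise_lt _
  have hb := pvBlocks C levels 0 0 hPW
    (fun x hx => by
      have := ((hmemlev x).mp hx).1
      simpa using this)
    (fun c hc => by
      by_cases h : 0 < c
      · exact Or.inr ((hmemlev c).mpr ⟨h, hc⟩)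
      · exact Or.inl (by simp; omega))
  simp only [Nat.cast_zero] at hb
  rw [hb]
  dsimp only
  rw [zero_add]
  -- the last level is the maximum count
  have hCne : C ≠ [] := by
    have := pvDigits_length_pos m.toNat
    intro hnil
    rw [hnil] at hClen
    simp at hClen
    omega
  obtain ⟨m0, hm0⟩ : ∃ m0, PySem.List.max? C (fun x => x) = some m0 := by
    cases hx : PySem.List.max? C (fun x => x) with
    | none => exact absurd ((PySem.List.max?_eq_none_iff C (fun x => x)).mp hx) hCne
    | some m0 => exact ⟨m0, rfl⟩
  have hm0mem : m0 ∈ C := PySem.List.max?_mem hm0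
  have hm0max : ∀ c ∈ C, c ≤ m0 := fun c hc => PySem.List.max?_isMax hm0 c hc
  have hbD : PySem.List.maxD C (fun x => x) 0 = m0 := by
    rw [PySem.List.maxD, hm0]
    rfl
  have hlast : pvLastN levels 0 = (PySem.List.maxD C (fun x => x) 0).toNat := by
    rw [hbD]
    cases hLc : levels with
    | nil =>
      have hm0np : ¬ 0 < m0 := by
        intro h
        have : m0 ∈ levels := (hmemlev m0).mpr ⟨h, hm0mem⟩
        rw [hLc] at this
        simp at this
      simp [pvLastN]
      omega
    | cons x L' =>
      obtain ⟨l, hl⟩ : ∃ l, levels.getLast? = some l := by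
        rw [hLc]
        exact ⟨(x :: L').getLast (by simp), List.getLast?_eq_some_getLast (by simp)⟩
      have hlmem : l ∈ levels := List.mem_of_getLast? hl
      have hl1 := (hmemlev l).mp hlmem
      have hlm0 : l ≤ m0 := hm0max l hl1.2
      have hm0pos : 0 < m0 := lt_of_lt_of_le hl1.1 hlm0
      have hm0lev : m0 ∈ levels := (hmemlev m0).mpr ⟨hm0pos, hm0mem⟩
      have hm0le : m0 ≤ l := by
        have := pvLast_isMax levels hPW m0 hm0lev 0
        rw [hl] at this
        simpa using this
      have hlm : l = m0 := le_antisymm hlm0 hm0le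
      rw [hLc] at hl
      simp [pvLastN, hl, hlm]
  rw [hlast, ← Finset.range_eq_Ico]

-- nonpositive maximum: both programs return 0
lemma pv_nonpos (n : Int) (arr : List Int) (hn : n ≠ 1)
    (m : Int) (hmax : PySem.List.max? arr (fun x => x) = some m) (hm : m ≤ 0) :
    largest_sum_of_squares n arr = largest_sum_of_squares_alt n arr := by
  simp only [largest_sum_of_squares, largest_sum_of_squares_alt, if_neg hn, hmax, Option.getD_some]
  have hmem : ∀ (v : Int), v ∈ arr → v ≤ 0 := fun v hv =>
    le_trans (PySem.List.max?_isMax hmax v hv) hm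
  have hget : ∀ (j : Int), (PySem.List.pyGet? arr j).getD 0 ≤ 0 := by
    intro j
    cases h : PySem.List.pyGet? arr j with
    | none => simp
    | some v => simpa using hmem v (PySem.List.mem_of_pyGet?_eq_some arr h)
  have haA1 : (1:Int) ≤ PySem.Str.len (PySem.Int.pyBin m) - 2 := by
    rw [PySem.Str.len, PySem.Int.toList_pyBin, PySem.Int.toBinChars0b]
    split_ifs with h
    · rw [pvDigits_eq_toDigits]
      have := pvDigits_length_pos m.natAbs
      simp only [List.length_cons]
      push_cast
      omega
    · rw [pvDigits_eq_toDigits]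
      have := pvDigits_length_pos m.toNat
      simp only [List.length_cons]
      push_cast
      omega
  -- A: the counting loop never fires, so lis stays all-zero, b = 0 and the answer is 0
  have hbodyA : ∀ (lis : List Int), ∀ i ∈ PySem.List.pyRange 0 (PySem.Str.len (PySem.Int.pyBin m) - 2) 1,
      List.foldl (fun lis j =>
        if (PySem.List.pyGet? arr j).getD 0 ≥ 2 ^ i.toNat then
          if (PySem.Str.pyGet? (PySem.Str.slice (PySem.Int.pyBin ((PySem.List.pyGet? arr j).getD 0))
              (some 2) none) (-i - 1)).getD ' ' = '1' then
            lis.set i.toNat (lis.getD i.toNat 0 + 1)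
          else lis
        else lis) lis (PySem.List.pyRange 0 n 1)
      = lis := by
    intro lis i _
    rw [PySem.List.foldl_congr_mem _ _ (fun lis (_ : Int) => lis) _ ?_, PySem.List.foldl_ignore]
    intro acc j _
    have h2 : (0:Int) < 2 ^ i.toNat := by positivity
    have := hget j
    rw [if_neg (by omega)]
  rw [PySem.List.foldl_congr_mem _ _ (fun lis (_ : Int) => lis) _ hbodyA, PySem.List.foldl_ignore]
  have hbA : (PySem.List.max? (List.replicate (PySem.Str.len (PySem.Int.pyBin m) - 2).toNat (0:Int))
      (fun x => x)).getD 0 = 0 := pvRepMax _ (by omega)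
  rw [hbA]
  rw [PySem.List.pyRange_one_eq_nil (le_refl 0), List.foldl_nil]
  rw [show PySem.List.len ([] : List Int) = ((0:Nat) : Int) from rfl]
  rw [PySem.List.pyRange_zero_nat 0, List.range_zero, List.map_nil, List.foldl_nil]
  -- B: no element is positive, so the counting loop is the identity and counts stays all-zero
  have hcnt0 : (PySem.List.slice arr none (some (max n 0))).foldl
      (fun c v => pvAddBits v 0 c)
      (List.replicate ((PySem.Int.bitLength m : Nat) : Int).toNat 0)
      = List.replicate ((PySem.Int.bitLength m : Nat) : Int).toNat (0:Int) := by
    rw [PySem.List.foldl_congr_mem _ _ (fun c (_ : Int) => c) _ ?_, PySem.List.foldl_ignore]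
    intro acc v hv
    have hv0 := hmem v (PySem.List.mem_of_mem_slice arr none (some (max n 0)) hv)
    rw [pvAddBits, dif_neg (by omega)]
  rw [hcnt0]
  have hfilt : (List.replicate ((PySem.Int.bitLength m : Nat) : Int).toNat (0:Int)).filter
      (fun c => decide (c > 0)) = [] := by
    rw [List.filter_eq_nil_iff]
    intro x hx
    have : x = 0 := List.eq_of_mem_replicate hx
    simp [this]
  rw [hfilt]
  rfl

lemma pv_main (n : Int) (arr : List Int) (hne : arr ≠ []) (hlen : (n:Int) ≤ arr.length) (hn : n ≠ 1) :
    largest_sum_of_squares n arr = largest_sum_of_squares_alt n arr := by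
  cases hmx : PySem.List.max? arr (fun x => x) with
  | none => exact absurd ((PySem.List.max?_eq_none_iff arr (fun x => x)).mp hmx) hne
  | some m =>
    by_cases hm : 0 < m
    · rw [pvA_canon n arr hlen hn m hmx hm, pvB_canon n arr hlen hn m hmx hm]
    · exact pv_nonpos n arr hn m hmx (by omega)

-- ===== VERDICT (by name: the statement is the Claim_ definition above) =====
theorem largest_sum_of_squares_spec : Claim_equal_largest_sum_of_squares := by
  intro n arr _ hpre
  unfold Spec_largest_sum_of_squares
  rcases hpre with ⟨hne, hlen⟩
  by_cases hn : n = 1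
  · subst hn
    rw [largest_sum_of_squares, largest_sum_of_squares_alt, if_pos rfl, if_pos rfl]
  · exact pv_main n arr hne hlen hn
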